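-- pv_equiv track=rewrite | github.com/kauanfeelipe/aprendizado-pratica-faculdade | ESTRUTURA-01-PYTHON/algoritmos_pilha03.py | intercalarPilhasordemCrescente
-- ===== SOURCE A (Python) =====
-- def push(p, v):
--     """Insere um elemento no topo da pilha"""
--     p.append(v)
--
-- def pop(p):
--     """Remove e retorna o elemento do topo da pilha"""
--     return p.pop()
--
-- def vazia(p):
--     """Verifica se a pilha esta vazia"""
--     return False if p else True
--
-- def intercalarPilhasordemCrescente(p1, p2, p3):
--     """Intercala elementos das pilhas em ordem crescente na pilha p3"""
--     aux1 = []
--     aux2 = []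
--
--     while not vazia(p1):
--         push(aux1, pop(p1))
--
--     while not vazia(p2):
--         push(aux2, pop(p2))
--
--     while not vazia(aux1) and not vazia(aux2):
--         v1 = pop(aux1)
--         v2 = pop(aux2)
--         if v1 < v2:
--             push(p3, v1)
--             push(aux2, v2)
--             push(p1, v1)
--         else:
--             push(p3, v2)
--             push(aux1, v1)
--             push(p2, v2)
--
--     while not vazia(aux1):
--         v = pop(aux1)
--         push(p1, v)
--         push(p3, v)
--
--     while not vazia(aux2):
--         v = pop(aux2)
--         push(p2, v)
--         push(p3, v)
--
--     return p3
-- ===== SOURCE B (Python) =====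
-- def intercalarPilhasordemCrescente(p1, p2, p3):
--     """Intercala elementos das pilhas em ordem crescente na pilha p3.
--     Two-pointer merge over p1 and p2 directly; unlike A it does not mutate
--     p1/p2 and returns a new list (p3's contents followed by the merge).
--     """
--     out = list(p3)
--     i = 0
--     j = 0
--     while i < len(p1) and j < len(p2):
--         if p1[i] < p2[j]:
--             out.append(p1[i])
--             i += 1
--         else:
--             out.append(p2[j])
--             j += 1
--     out.extend(p1[i:])
--     out.extend(p2[j:])
--     return out
-- ===== Notes on version B (the rewrite author's own statement) =====
-- stated objective: simpler
-- what changed: Replaces A's four destructive stack loops (dump p1/p2 into two auxiliary stacks, pop-compare-push-back while restoring p1/p2) with a non-mutating two-pointer merge over p1 and p2 appended to a copy of p3.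
import Mathlib
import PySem

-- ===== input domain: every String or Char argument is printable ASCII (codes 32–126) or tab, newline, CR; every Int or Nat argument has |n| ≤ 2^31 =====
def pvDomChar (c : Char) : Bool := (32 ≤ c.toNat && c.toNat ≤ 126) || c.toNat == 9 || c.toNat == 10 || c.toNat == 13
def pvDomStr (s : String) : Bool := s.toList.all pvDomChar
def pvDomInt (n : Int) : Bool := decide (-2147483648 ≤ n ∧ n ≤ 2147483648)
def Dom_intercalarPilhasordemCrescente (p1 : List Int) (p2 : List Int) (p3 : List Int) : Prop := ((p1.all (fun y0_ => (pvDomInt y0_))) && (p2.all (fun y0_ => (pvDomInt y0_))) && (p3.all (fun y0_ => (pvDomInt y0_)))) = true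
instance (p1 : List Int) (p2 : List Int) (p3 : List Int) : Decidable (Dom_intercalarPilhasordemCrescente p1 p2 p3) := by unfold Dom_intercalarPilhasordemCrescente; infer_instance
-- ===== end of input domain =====

-- B replaces A's destructive pop/push shuffle through two auxiliary stacks by a
-- non-mutating two-pointer merge of p1 and p2 appended to a copy of p3 (simpler).
-- Equivalence is about the RETURN value only: A mutates p1/p2 (restoring them) and
-- appends to p3 in place; B leaves its arguments untouched and returns a new list.

-- ===== PORT A =====
-- termination measures for the loop transliterations (cited by the ports' decreasing_by)
theorem pv_dropLast_lt {l : List Int} (h : l ≠ []) : l.dropLast.length < l.length := by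
  have := List.length_pos_iff.mpr h
  simp only [List.length_dropLast]
  omega

theorem pv_merge_dec_left {a b : List Int} (x : Int) (ha : a ≠ []) (hb : b ≠ []) :
    a.dropLast.length + (b.dropLast ++ [x]).length < a.length + b.length := by
  have h1 := List.length_pos_iff.mpr ha
  have h2 := List.length_pos_iff.mpr hb
  simp only [List.length_append, List.length_dropLast, List.length_cons, List.length_nil]
  omega

theorem pv_merge_dec_right {a b : List Int} (x : Int) (ha : a ≠ []) (hb : b ≠ []) :
    (a.dropLast ++ [x]).length + b.dropLast.length < a.length + b.length := by
  have h1 := List.length_pos_iff.mpr ha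
  have h2 := List.length_pos_iff.mpr hb
  simp only [List.length_append, List.length_dropLast, List.length_cons, List.length_nil]
  omega

theorem pv_idx_dec_left {m n i j : Nat} (h : i < m) :
    m - (i + 1) + (n - j) < m - i + (n - j) := by omega

theorem pv_idx_dec_right {m n i j : Nat} (h : j < n) :
    m - i + (n - (j + 1)) < m - i + (n - j) := by omega

-- `while not vazia(src): push(dst, pop(src))` — Python lists as stacks, top = end
def pvTransfer (src dst : List Int) : List Int :=
  if h : src = [] then dst
  else pvTransfer src.dropLast (dst ++ [src.getLast h])
termination_by src.length
decreasing_by exact pv_dropLast_lt h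

-- `while not vazia(aux): v = pop(aux); push(q, v); push(p3, v)` — returns (q, p3)
def pvDrain (aux q p3 : List Int) : List Int × List Int :=
  if h : aux = [] then (q, p3)
  else pvDrain aux.dropLast (q ++ [aux.getLast h]) (p3 ++ [aux.getLast h])
termination_by aux.length
decreasing_by exact pv_dropLast_lt h

-- `while not vazia(aux1) and not vazia(aux2): …` then the two drain loops
def pvMergeLoop (aux1 aux2 q1 q2 p3 : List Int) : List Int :=
  if h : aux1 ≠ [] ∧ aux2 ≠ [] then
    -- v1 = pop(aux1), v2 = pop(aux2)
    if aux1.getLast h.1 < aux2.getLast h.2 then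
      pvMergeLoop aux1.dropLast (aux2.dropLast ++ [aux2.getLast h.2])
        (q1 ++ [aux1.getLast h.1]) q2 (p3 ++ [aux1.getLast h.1])
    else
      pvMergeLoop (aux1.dropLast ++ [aux1.getLast h.1]) aux2.dropLast
        q1 (q2 ++ [aux2.getLast h.2]) (p3 ++ [aux2.getLast h.2])
  else
    (pvDrain aux2 q2 (pvDrain aux1 q1 p3).2).2
termination_by aux1.length + aux2.length
decreasing_by
  · exact pv_merge_dec_left _ h.1 h.2
  · exact pv_merge_dec_right _ h.1 h.2

def intercalarPilhasordemCrescente (p1 : List Int) (p2 : List Int) (p3 : List Int) : List Int :=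
  let aux1 := pvTransfer p1 []
  let aux2 := pvTransfer p2 []
  pvMergeLoop aux1 aux2 [] [] p3

-- ===== PORT B =====
-- `while i < len(p1) and j < len(p2): …` two-pointer merge, then the two extends
def pvMergeIdx (p1 p2 : List Int) (i j : Nat) (out : List Int) : List Int :=
  if h : i < p1.length ∧ j < p2.length then  -- h used by decreasing_by
    if p1.getD i 0 < p2.getD j 0 then
      pvMergeIdx p1 p2 (i + 1) j (out ++ [p1.getD i 0])
    else
      pvMergeIdx p1 p2 i (j + 1) (out ++ [p2.getD j 0])
  else
    out ++ p1.drop i ++ p2.drop j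
termination_by (p1.length - i) + (p2.length - j)
decreasing_by
  · exact pv_idx_dec_left h.1
  · exact pv_idx_dec_right h.2

def intercalarPilhasordemCrescente_alt (p1 : List Int) (p2 : List Int) (p3 : List Int) : List Int :=
  pvMergeIdx p1 p2 0 0 p3

-- ===== PRECONDITION & SPEC =====
def Spec_intercalarPilhasordemCrescente (p1 : List Int) (p2 : List Int) (p3 : List Int) (out : List Int) : Prop := out = intercalarPilhasordemCrescente_alt p1 p2 p3
instance (p1 : List Int) (p2 : List Int) (p3 : List Int) (out : List Int) : Decidable (Spec_intercalarPilhasordemCrescente p1 p2 p3 out) := by unfold Spec_intercalarPilhasordemCrescente; infer_instance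

-- ===== CLAIM (what is proved, stated in full; the proofs are below) =====
def Claim_equal_intercalarPilhasordemCrescente : Prop := ∀ (p1 : List Int) (p2 : List Int) (p3 : List Int), Dom_intercalarPilhasordemCrescente p1 p2 p3 → Spec_intercalarPilhasordemCrescente p1 p2 p3 (intercalarPilhasordemCrescente p1 p2 p3)

-- ===== LEMMAS AND PROOFS =====
theorem reverse_eq_getLast_cons {l : List Int} (h : l ≠ []) :
    l.reverse = l.getLast h :: l.dropLast.reverse := by
  conv_lhs => rw [← List.dropLast_concat_getLast h]
  simp

theorem pvTransfer_eq (src dst : List Int) : pvTransfer src dst = dst ++ src.reverse := by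
  induction src, dst using pvTransfer.induct with
  | case1 => simp [pvTransfer]
  | case2 src dst h ih =>
      rw [pvTransfer]
      simp only [h, dite_false, ih, reverse_eq_getLast_cons h]
      simp

theorem pvDrain_eq (aux q p3 : List Int) : (pvDrain aux q p3).2 = p3 ++ aux.reverse := by
  induction aux, q, p3 using pvDrain.induct with
  | case1 => simp [pvDrain]
  | case2 aux q p3 h ih =>
      rw [pvDrain]
      simp only [h, dite_false, ih, reverse_eq_getLast_cons h]
      simp

-- proof-only helper: the merge both loops compute, on list suffixes
def pvMerge : List Int → List Int → List Int
  | [], ys => ys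
  | xs, [] => xs
  | x :: xs, y :: ys =>
      if x < y then x :: pvMerge xs (y :: ys) else y :: pvMerge (x :: xs) ys

theorem pvMerge_nil_right (xs : List Int) : pvMerge xs [] = xs := by
  cases xs <;> simp [pvMerge]

theorem pvMergeLoop_eq (aux1 aux2 q1 q2 p3 : List Int) :
    pvMergeLoop aux1 aux2 q1 q2 p3 = p3 ++ pvMerge aux1.reverse aux2.reverse := by
  induction aux1, aux2, q1, q2, p3 using pvMergeLoop.induct with
  | case1 aux1 aux2 q1 q2 p3 h hlt ih =>
      rw [pvMergeLoop, dif_pos h]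
      simp only [hlt, if_true, ih]
      rw [List.dropLast_concat_getLast h.2,
        reverse_eq_getLast_cons h.1, reverse_eq_getLast_cons h.2]
      simp [pvMerge, hlt]
  | case2 aux1 aux2 q1 q2 p3 h hge ih =>
      rw [pvMergeLoop, dif_pos h]
      simp only [hge, if_false, ih]
      rw [List.dropLast_concat_getLast h.1,
        reverse_eq_getLast_cons h.1, reverse_eq_getLast_cons h.2]
      simp [pvMerge, hge]
  | case3 aux1 aux2 q1 q2 p3 h =>
      rw [pvMergeLoop]
      simp only [h, dite_false]
      rcases Decidable.em (aux1 = []) with h1 | h1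
      · subst h1
        have e1 : pvDrain ([] : List Int) q1 p3 = (q1, p3) := by rw [pvDrain]; simp
        rw [e1, pvDrain_eq]
        simp [pvMerge]
      · have h2 : aux2 = [] := by tauto
        subst h2
        have e2 : pvDrain ([] : List Int) q2 (pvDrain aux1 q1 p3).2
            = (q2, (pvDrain aux1 q1 p3).2) := by rw [pvDrain]; simp
        rw [e2, pvDrain_eq]
        simp [pvMerge_nil_right]

theorem pvMergeIdx_eq (p1 p2 : List Int) (i j : Nat) (out : List Int) :
    pvMergeIdx p1 p2 i j out = out ++ pvMerge (p1.drop i) (p2.drop j) := by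
  induction i, j, out using pvMergeIdx.induct p1 p2 with
  | case1 i j out h hlt ih =>
      rw [pvMergeIdx, dif_pos h, if_pos hlt, ih,
        List.drop_eq_getElem_cons h.1, List.drop_eq_getElem_cons h.2, pvMerge]
      rw [List.getD_eq_getElem _ _ h.1, List.getD_eq_getElem _ _ h.2] at hlt
      simp [hlt, List.getElem?_eq_getElem h.1]
  | case2 i j out h hge ih =>
      rw [pvMergeIdx, dif_pos h, if_neg hge, ih,
        List.drop_eq_getElem_cons h.1, List.drop_eq_getElem_cons h.2, pvMerge]
      rw [List.getD_eq_getElem _ _ h.1, List.getD_eq_getElem _ _ h.2] at hge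
      simp [hge, List.getElem?_eq_getElem h.2]
  | case3 i j out h =>
      rw [pvMergeIdx, dif_neg h]
      rcases Decidable.em (i < p1.length) with h1 | h1
      · have h2 : p2.length ≤ j := by omega
        rw [List.drop_eq_nil_of_le h2, pvMerge_nil_right]
        simp
      · have h2 : p1.length ≤ i := by omega
        rw [List.drop_eq_nil_of_le h2]
        simp [pvMerge]

-- ===== VERDICT (by name: the statement is the Claim_ definition above) =====
theorem intercalarPilhasordemCrescente_spec : Claim_equal_intercalarPilhasordemCrescente := by
  intro p1 p2 p3 _
  unfold Spec_intercalarPilhasordemCrescente intercalarPilhasordemCrescente intercalarPilhasordemCrescente_alt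
  simp [pvTransfer_eq, pvMergeLoop_eq, pvMergeIdx_eq]
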